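-- pv_equiv track=rewrite | github.com/alumnos-ingcom/TP5-agusanhorn | tp5ej13.py | busqueda_de_palabra
-- ===== SOURCE A (Python) =====
-- class IngresoIncorrecto(Exception):
--     pass
--
-- def busqueda_de_palabra(texto, palabra):
--     texto = texto.lower()
--     palabra = palabra.lower()
--     lista = []
--     palabras_lista = ""
--     for i in texto:
--         if i == " ":
--             lista.append(palabras_lista)
--             palabras_lista = ""
--         else:
--             palabras_lista += i
--     if palabras_lista:
--         lista.append(palabras_lista)
--     try:
--         posicion = lista.index(palabra)
--         return posicion
--     except ValueError as err:
--         raise IngresoIncorrecto(f"La palabra '{palabra}' no se encuentra en el texto") from err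
-- ===== SOURCE B (Python) =====
-- class IngresoIncorrecto(Exception):
--     pass
--
-- def busqueda_de_palabra(texto, palabra):
--     palabra = palabra.lower()
--     idx = 0
--     buf = ""
--     for c in texto.lower():
--         if c == " ":
--             if buf == palabra:
--                 return idx
--             idx += 1
--             buf = ""
--         else:
--             buf += c
--     if buf and buf == palabra:
--         return idx
--     raise IngresoIncorrecto(f"La palabra '{palabra}' no se encuentra en el texto")
-- ===== Notes on version B (the rewrite author's own statement) =====
-- stated objective: simpler
-- what changed: B streams over the characters once keeping only a current-word buffer and a running word index, returning at the first match, instead of A's materialising the full word list and then calling list.index.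
import Mathlib
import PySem

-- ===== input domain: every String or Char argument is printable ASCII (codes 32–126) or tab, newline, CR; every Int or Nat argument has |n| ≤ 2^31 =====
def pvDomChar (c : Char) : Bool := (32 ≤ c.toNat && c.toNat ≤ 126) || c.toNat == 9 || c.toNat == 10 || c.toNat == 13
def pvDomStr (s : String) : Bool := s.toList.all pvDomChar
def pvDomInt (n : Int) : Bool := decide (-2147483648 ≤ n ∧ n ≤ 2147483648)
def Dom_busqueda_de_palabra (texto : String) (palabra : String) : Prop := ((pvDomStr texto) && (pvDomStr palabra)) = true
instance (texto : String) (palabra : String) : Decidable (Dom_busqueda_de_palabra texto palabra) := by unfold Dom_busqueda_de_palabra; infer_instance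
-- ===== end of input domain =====

-- B replaces A's build-the-word-list-then-list.index with a single streaming pass that keeps only
-- a current-word buffer and a running index (objective: simpler — no list is materialised).
-- Where the Python raises IngresoIncorrecto (word not found) both ports return -1; Pre_ excludes those inputs.

-- ===== PORT A =====
-- lista.append(w) / palabras_lista += i are encoded with reverse-accumulators (cons, reversed at
-- the end) — the standard linear Lean encoding of Python's O(1) append; same loop, same branches.
def busqueda_de_palabra (texto : String) (palabra : String) : Int :=
  let t := PySem.Chars.lower texto.toList
  let p := PySem.Chars.lower palabra.toList
  let st := t.foldl (fun (st : List (List Char) × List Char) i =>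
      if i = ' ' then (st.2.reverse :: st.1, ([] : List Char)) else (st.1, i :: st.2)) ([], [])
  let lista := (if st.2 ≠ [] then st.2.reverse :: st.1 else st.1).reverse
  match PySem.List.index? lista p with
  | some posicion => (posicion : Int)
  | none => -1  -- Python raises IngresoIncorrecto here; such inputs are excluded by Pre_

-- ===== PORT B =====
-- streaming loop of Source B: on a space compare the buffer and either return idx or advance; no word
-- list; buf += c is again the reverse-accumulator encoding of the growing string buffer
def pvLoopB (p : List Char) (cs : List Char) (idx : Int) (buf : List Char) : Option Int :=
  match cs with
  | [] => if buf ≠ [] ∧ buf.reverse = p then some idx else none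
  | c :: rest =>
      if c = ' ' then
        if buf.reverse = p then some idx else pvLoopB p rest (idx + 1) []
      else pvLoopB p rest idx (c :: buf)

def busqueda_de_palabra_alt (texto : String) (palabra : String) : Int :=
  let p := PySem.Chars.lower palabra.toList
  match pvLoopB p (PySem.Chars.lower texto.toList) 0 [] with
  | some i => i
  | none => -1  -- Python raises IngresoIncorrecto here; such inputs are excluded by Pre_

-- ===== PRECONDITION & SPEC =====
-- the maximal space-free segments of a text, in order (Python's t.split(" "))
def pvSegs (t : List Char) : List (List Char) :=
  match t with
  | [] => [[]]
  | c :: rest =>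
      if c = ' ' then [] :: pvSegs rest
      else match pvSegs rest with
           | w :: ws => (c :: w) :: ws
           | [] => [[c]]

-- drop a trailing empty segment (A keeps the final buffer only when non-empty)
def pvTrim (ps : List (List Char)) : List (List Char) :=
  if ps.getLast? = some [] then ps.dropLast else ps

-- Pre_ excludes exactly the inputs on which the Python raises IngresoIncorrecto: the lowered word
-- must occur among the space-separated words of the lowered text (trailing empty segment dropped).
def Pre_busqueda_de_palabra (texto : String) (palabra : String) : Prop :=
  PySem.Chars.lower palabra.toList ∈ pvTrim (pvSegs (PySem.Chars.lower texto.toList))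

instance (texto : String) (palabra : String) : Decidable (Pre_busqueda_de_palabra texto palabra) := by
  unfold Pre_busqueda_de_palabra; infer_instance

def pvWitness_busqueda_de_palabra : String × String := ("Hola mundo", "MUNDO")

def Spec_busqueda_de_palabra (texto : String) (palabra : String) (out : Int) : Prop := out = busqueda_de_palabra_alt texto palabra
instance (texto : String) (palabra : String) (out : Int) : Decidable (Spec_busqueda_de_palabra texto palabra out) := by unfold Spec_busqueda_de_palabra; infer_instance

-- ===== CLAIM (what is proved, stated in full; the proofs are below) =====
def Claim_equal_busqueda_de_palabra : Prop := ∀ (texto : String) (palabra : String), Dom_busqueda_de_palabra texto palabra → Pre_busqueda_de_palabra texto palabra → Spec_busqueda_de_palabra texto palabra (busqueda_de_palabra texto palabra)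

-- ===== LEMMAS AND PROOFS =====

-- common description of both programs' word building: the words of buf ++ cs whose first word
-- extends buf, with a trailing empty word dropped
def pvCollect (cs : List Char) (buf : List Char) : List (List Char) :=
  match cs with
  | [] => if buf = [] then [] else [buf]
  | c :: rest => if c = ' ' then buf :: pvCollect rest [] else pvCollect rest (buf ++ [c])

lemma pvSegs_ne_nil (t : List Char) : pvSegs t ≠ [] := by
  cases t with
  | nil => simp [pvSegs]
  | cons c rest =>
      simp only [pvSegs]
      split
      · simp
      · cases h : pvSegs rest <;> simp

lemma pvTrim_cons (b : List Char) (ps : List (List Char)) (h : ps ≠ []) :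
    pvTrim (b :: ps) = b :: pvTrim ps := by
  unfold pvTrim
  cases ps with
  | nil => exact absurd rfl h
  | cons q qs =>
      simp only [List.getLast?_cons_cons, List.dropLast_cons_of_ne_nil (by simp : q :: qs ≠ [])]
      split <;> rfl

lemma pvCollect_eq_trim (cs : List Char) (buf w : List Char) (ws : List (List Char))
    (h : pvSegs cs = w :: ws) : pvCollect cs buf = pvTrim ((buf ++ w) :: ws) := by
  induction cs generalizing buf w ws with
  | nil =>
      simp only [pvSegs] at h
      injection h with hw hws
      subst hw; subst hws
      simp only [pvCollect, List.append_nil, pvTrim]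
      by_cases hb : buf = [] <;> simp [hb]
  | cons c rest ih =>
      simp only [pvSegs] at h
      by_cases hc : c = ' '
      · rw [if_pos hc] at h
        injection h with hw hws
        subst hw; subst hws
        simp only [pvCollect, if_pos hc, List.append_nil]
        obtain ⟨w', ws', hseg⟩ : ∃ w' ws', pvSegs rest = w' :: ws' := by
          cases hr : pvSegs rest with
          | nil => exact absurd hr (pvSegs_ne_nil rest)
          | cons a b => exact ⟨a, b, rfl⟩
        rw [ih [] w' ws' hseg, hseg, List.nil_append,
            pvTrim_cons buf (w' :: ws') (by simp)]
      · rw [if_neg hc] at h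
        cases hr : pvSegs rest with
        | nil => exact absurd hr (pvSegs_ne_nil rest)
        | cons w' ws' =>
            rw [hr] at h
            injection h with hw hws
            subst hw; subst hws
            simp only [pvCollect, if_neg hc]
            rw [ih (buf ++ [c]) w' ws' hr]
            simp

lemma pvFoldA (cs : List Char) (l : List (List Char)) (b : List Char) :
    (if (cs.foldl (fun (st : List (List Char) × List Char) i =>
        if i = ' ' then (st.2.reverse :: st.1, ([] : List Char)) else (st.1, i :: st.2)) (l, b)).2 ≠ []
     then (cs.foldl (fun (st : List (List Char) × List Char) i =>
        if i = ' ' then (st.2.reverse :: st.1, ([] : List Char)) else (st.1, i :: st.2)) (l, b)).2.reverse ::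
          (cs.foldl (fun (st : List (List Char) × List Char) i =>
        if i = ' ' then (st.2.reverse :: st.1, ([] : List Char)) else (st.1, i :: st.2)) (l, b)).1
     else (cs.foldl (fun (st : List (List Char) × List Char) i =>
        if i = ' ' then (st.2.reverse :: st.1, ([] : List Char)) else (st.1, i :: st.2)) (l, b)).1).reverse
    = l.reverse ++ pvCollect cs b.reverse := by
  induction cs generalizing l b with
  | nil =>
      simp only [List.foldl_nil, pvCollect]
      by_cases hb : b = [] <;> simp [hb]
  | cons c rest ih =>
      simp only [List.foldl_cons, pvCollect]
      by_cases hc : c = ' '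
      · simp only [if_pos hc]
        rw [ih (b.reverse :: l) []]
        simp
      · simp only [if_neg hc]
        rw [ih l (c :: b)]
        simp

lemma pvLoopB_eq (p : List Char) (cs : List Char) (idx : Int) (buf : List Char) :
    pvLoopB p cs idx buf =
      Option.map (fun k : Nat => idx + (k : Int))
        (PySem.List.index? (pvCollect cs buf.reverse) p) := by
  induction cs generalizing idx buf with
  | nil =>
      simp only [pvLoopB, pvCollect]
      by_cases hb : buf = []
      · subst hb
        simp [show PySem.List.index? ([] : List (List Char)) p = none from rfl]
      · have hb' : buf.reverse ≠ [] := by simp [hb]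
        rw [if_neg hb']
        by_cases hp : buf.reverse = p
        · rw [← hp, PySem.List.index?_cons_self]
          simp [hb]
        · rw [PySem.List.index?_cons_of_ne [] hp,
              show PySem.List.index? ([] : List (List Char)) p = none from rfl]
          simp [hb, hp]
  | cons c rest ih =>
      simp only [pvLoopB, pvCollect]
      by_cases hc : c = ' '
      · simp only [if_pos hc]
        by_cases hp : buf.reverse = p
        · rw [if_pos hp, ← hp, PySem.List.index?_cons_self]
          simp
        · rw [if_neg hp, PySem.List.index?_cons_of_ne _ hp, ih (idx + 1) []]
          rw [Option.map_map]
          congr 1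
          funext k
          simp only [Function.comp_apply]
          push_cast
          ring
      · simp only [if_neg hc]
        rw [ih idx (c :: buf)]
        simp

-- ===== VERDICT (by name: the statement is the Claim_ definition above) =====
theorem busqueda_de_palabra_spec : Claim_equal_busqueda_de_palabra := by
  unfold Claim_equal_busqueda_de_palabra
  intro texto palabra _ hpre
  unfold Pre_busqueda_de_palabra at hpre
  unfold Spec_busqueda_de_palabra
  simp only [busqueda_de_palabra, busqueda_de_palabra_alt]
  rw [pvLoopB_eq, pvFoldA]
  simp only [List.nil_append, List.reverse_nil]
  obtain ⟨w, ws, hseg⟩ : ∃ w ws, pvSegs (PySem.Chars.lower texto.toList) = w :: ws := by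
    cases hr : pvSegs (PySem.Chars.lower texto.toList) with
    | nil => exact absurd hr (pvSegs_ne_nil _)
    | cons a b => exact ⟨a, b, rfl⟩
  have hcol : pvCollect (PySem.Chars.lower texto.toList) [] =
      pvTrim (pvSegs (PySem.Chars.lower texto.toList)) := by
    rw [pvCollect_eq_trim _ [] w ws hseg, hseg, List.nil_append]
  have hmem : PySem.Chars.lower palabra.toList ∈
      pvCollect (PySem.Chars.lower texto.toList) [] := by
    rw [hcol]; exact hpre
  have hsome : (PySem.List.index? (pvCollect (PySem.Chars.lower texto.toList) [])
      (PySem.Chars.lower palabra.toList)).isSome = true :=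
    Iff.mpr (PySem.List.index?_isSome_iff _ _) hmem
  obtain ⟨k, hk⟩ := Option.isSome_iff_exists.mp hsome
  rw [hk]
  simp
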